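-- pv_equiv track=rewrite | github.com/AryanTKh/Tamrin01 | DNA-2.py | replace_twin
-- ===== SOURCE A (Python) =====
-- def replace_twin(dna):
--     i = 0
--     while i < len(dna) - 2:
--         if dna[i] == dna[i+1] == 't':
--             dna = dna[:i] + 'o' + dna[i+2:]
--             i -=2
--
--         i += 1
--
--     return dna
-- ===== SOURCE B (Python) =====
-- def replace_twin(dna):
--     # run-length encode, then rebuild: each run of k 't's becomes k//2 'o's plus a leftover 't' if k is odd
--     runs = []
--     for ch in dna:
--         if runs and runs[-1][0] == ch:
--             runs[-1] = (ch, runs[-1][1] + 1)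
--         else:
--             runs.append((ch, 1))
--     return ''.join('o' * (k // 2) + 't' * (k % 2) if ch == 't' else ch * k
--                    for ch, k in runs)
-- ===== Notes on version B (the rewrite author's own statement) =====
-- stated objective: alternative
-- what changed: Replaced the in-place pairwise index scan that splices the whole string on every replacement by a single run-length encoding pass that rebuilds the output run by run with arithmetic on run lengths (k//2 'o's plus a leftover 't' if k is odd).
-- intended difference: On strings whose trailing maximal run of 't's has even positive length, A's off-by-one loop bound (i < len(dna)-2) leaves the final 'tt' unreplaced (e.g. 'tt' -> 'tt') while B replaces every non-overlapping 'tt' (e.g. 'tt' -> 'o'), which is the function's intent. — e.g. on replace_twin("tt"): A returns "tt", B returns "o"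
import Mathlib
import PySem

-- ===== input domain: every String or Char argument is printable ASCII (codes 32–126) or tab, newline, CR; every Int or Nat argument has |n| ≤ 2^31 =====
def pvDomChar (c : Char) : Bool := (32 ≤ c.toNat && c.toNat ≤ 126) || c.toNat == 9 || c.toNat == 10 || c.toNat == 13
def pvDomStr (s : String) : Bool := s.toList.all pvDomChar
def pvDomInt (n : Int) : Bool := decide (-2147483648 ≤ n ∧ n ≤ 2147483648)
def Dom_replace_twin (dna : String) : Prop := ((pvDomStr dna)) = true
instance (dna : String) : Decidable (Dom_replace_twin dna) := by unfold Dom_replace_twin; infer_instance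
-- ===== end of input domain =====

-- B replaces A's pairwise index scan (which splices the whole string on every hit) by one
-- run-length-encoding pass that rebuilds the output run by run (objective: alternative);
-- A's off-by-one loop bound leaves a final 'tt' unreplaced, B replaces it (see D_ below).

-- ===== PORT A =====
-- the while loop of A; fuel only makes the recursion total (each real iteration
-- decreases 2*len - i, so 2*len + 1 fuel is never exhausted from the initial state)
def pvALoop : Nat → List Char → Int → List Char
  | 0, dna, _ => dna
  | fuel + 1, dna, i =>
    if i < PySem.List.len dna - 2 then
      match PySem.List.pyGet? dna i, PySem.List.pyGet? dna (i + 1) with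
      | some a, some b =>
        if a == b && b == 't' then
          -- dna = dna[:i] + 'o' + dna[i+2:]; i -= 2; i += 1
          pvALoop fuel
            (PySem.List.slice dna none (some i) ++ 'o' :: PySem.List.slice dna (some (i + 2)) none)
            (i - 2 + 1)
        else
          pvALoop fuel dna (i + 1)
      | _, _ => dna  -- IndexError: unreachable, the loop guard keeps both indices in range
    else dna

def replace_twin (dna : String) : String :=
  String.ofList (pvALoop (2 * dna.toList.length + 1) dna.toList 0)

-- ===== PORT B =====
-- runs[-1] merge-or-append step of B's first loop
def pvAddRun (runs : List (Char × Nat)) (ch : Char) : List (Char × Nat) :=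
  match runs.getLast? with
  | some (c, k) => if c == ch then runs.dropLast ++ [(c, k + 1)] else runs ++ [(ch, 1)]
  | none => [(ch, 1)]

-- the per-run piece of B's join
def pvPiece (p : Char × Nat) : List Char :=
  if p.1 = 't' then List.replicate (p.2 / 2) 'o' ++ List.replicate (p.2 % 2) 't'
  else List.replicate p.2 p.1

def replace_twin_alt (dna : String) : String :=
  String.ofList ((dna.toList.foldl pvAddRun []).flatMap pvPiece)

-- ===== PRECONDITION & SPEC =====
-- length of the trailing run of 't's
def pvTrailT : List Char → Nat
  | [] => 0
  | c :: l => if c = 't' ∧ pvTrailT l = l.length then l.length + 1 else pvTrailT l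

-- On strings whose trailing maximal run of 't's has even positive length, A's off-by-one
-- loop bound (i < len(dna)-2) leaves the final 'tt' unreplaced (e.g. "tt" -> "tt") while B
-- replaces every non-overlapping 'tt' ("tt" -> "o"), which is the function's intent.
def D_replace_twin (dna : String) : Prop :=
  2 ≤ pvTrailT dna.toList ∧ pvTrailT dna.toList % 2 = 0
instance (dna : String) : Decidable (D_replace_twin dna) := by unfold D_replace_twin; infer_instance

def Spec_replace_twin (dna : String) (out : String) : Prop :=
  ¬ D_replace_twin dna → out = replace_twin_alt dna
instance (dna : String) (out : String) : Decidable (Spec_replace_twin dna out) := by unfold Spec_replace_twin; infer_instance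

def pvDiffWitness_replace_twin : String := "tt"
def pvDiffWitnessOut_replace_twin : String × String := ("tt", "o")

-- ===== CLAIM (what is proved, stated in full; the proofs are below) =====
def Claim_unchanged_replace_twin : Prop :=
  ∀ (dna : String), Dom_replace_twin dna → Spec_replace_twin dna (replace_twin dna)
def Claim_changed_replace_twin : Prop :=
  Dom_replace_twin (pvDiffWitness_replace_twin) ∧ D_replace_twin (pvDiffWitness_replace_twin) ∧
  replace_twin (pvDiffWitness_replace_twin) = pvDiffWitnessOut_replace_twin.1 ∧
  replace_twin_alt (pvDiffWitness_replace_twin) = pvDiffWitnessOut_replace_twin.2 ∧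
  pvDiffWitnessOut_replace_twin.1 ≠ pvDiffWitnessOut_replace_twin.2
def Claim_exact_replace_twin : Prop :=
  ∀ (dna : String), Dom_replace_twin dna → D_replace_twin dna →
    replace_twin dna ≠ replace_twin_alt dna

-- ===== LEMMAS AND PROOFS =====

-- A's greedy scan, characterised: pairwise left-to-right, final pair untouched
def pvSpec : List Char → List Char
  | [] => []
  | [c] => [c]
  | [c, d] => [c, d]
  | a :: b :: c :: r =>
    if a = 't' ∧ b = 't' then 'o' :: pvSpec (c :: r) else a :: pvSpec (b :: c :: r)

-- B's result, characterised: pairwise left-to-right over the whole string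
def pvSpecB : List Char → List Char
  | [] => []
  | [c] => [c]
  | a :: b :: r => if a = 't' ∧ b = 't' then 'o' :: pvSpecB r else a :: pvSpecB (b :: r)

theorem pvSpec_short (l : List Char) (h : l.length ≤ 2) : pvSpec l = l := by
  match l with
  | [] => rfl
  | [c] => rfl
  | [c, d] => rfl
  | a :: b :: c :: r => simp at h

theorem pvGet_some (xs : List Char) (i : Int) (h1 : -(xs.length : Int) ≤ i)
    (h2 : i < xs.length) : ∃ z, PySem.List.pyGet? xs i = some z := by
  rcases h : PySem.List.pyGet? xs i with _ | z
  · rw [PySem.List.pyGet?_eq_none_iff] at h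
    exact absurd (by simp [PySem.Raise.InRange]; omega) h
  · exact ⟨z, rfl⟩

theorem pvALoop_step (f : Nat) (dna : List Char) (i : Int) (a b : Char)
    (hg : i < PySem.List.len dna - 2)
    (ha : PySem.List.pyGet? dna i = some a) (hb : PySem.List.pyGet? dna (i + 1) = some b) :
    pvALoop (f + 1) dna i =
      if a == b && b == 't' then
        pvALoop f
          (PySem.List.slice dna none (some i) ++ 'o' :: PySem.List.slice dna (some (i + 2)) none)
          (i - 2 + 1)
      else pvALoop f dna (i + 1) := by
  rw [pvALoop, if_pos hg, ha, hb]

theorem pvALoop_stop (f : Nat) (dna : List Char) (i : Int)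
    (hg : ¬ i < PySem.List.len dna - 2) :
    pvALoop (f + 1) dna i = dna := by
  rw [pvALoop, if_neg hg]

theorem pvALoop_eq (fuel : Nat) (s : List Char) (n : Nat)
    (hf : 2 * s.length ≤ fuel + n) :
    pvALoop fuel s n = s.take n ++ pvSpec (s.drop n) := by
  induction fuel using Nat.strong_induction_on generalizing s n with
  | _ fuel ih =>
  cases fuel with
  | zero =>
    have hlen : s.length ≤ n := by omega
    rw [pvALoop, List.take_of_length_le hlen, List.drop_of_length_le hlen]
    simp [pvSpec]
  | succ f =>
    by_cases hg : (n : Int) < PySem.List.len s - 2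
    · -- loop guard holds: n + 2 < s.length
      have hn2 : n + 2 < s.length := by
        simp only [PySem.List.len_eq] at hg; omega
      obtain ⟨a, b, c, r, hd⟩ : ∃ a b c r, s.drop n = a :: b :: c :: r := by
        have h3 : 3 ≤ (s.drop n).length := by simp; omega
        match hm : s.drop n with
        | [] | [_] | [_, _] => rw [hm] at h3; simp at h3
        | a :: b :: c :: r => exact ⟨a, b, c, r, rfl⟩
      have ha : s[n]? = some a := by
        have h : (List.drop n s)[0]? = s[n + 0]? := List.getElem?_drop
        rw [hd] at h; simpa using h.symm
      have hb : s[n + 1]? = some b := by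
        have h : (List.drop n s)[1]? = s[n + 1]? := List.getElem?_drop
        rw [hd] at h; simpa using h.symm
      have hga : PySem.List.pyGet? s (n : Int) = some a := by simp [ha]
      have hgb : PySem.List.pyGet? s ((n : Int) + 1) = some b := by
        rw [show ((n : Int) + 1) = ((n + 1 : Nat) : Int) by omega,
          PySem.List.pyGet?_natCast, hb]
      have hdrop1 : s.drop (n + 1) = b :: c :: r := by
        have : s.drop (n + 1) = (s.drop n).drop 1 := by rw [List.drop_drop]
        rw [this, hd]; rfl
      have hdrop2 : s.drop (n + 2) = c :: r := by
        have : s.drop (n + 2) = (s.drop n).drop 2 := by rw [List.drop_drop]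
        rw [this, hd]; rfl
      rw [pvALoop_step f s (n : Int) a b hg hga hgb]
      by_cases hab : a = b ∧ b = 't'
      · -- replacement case: a = b = 't'
        obtain ⟨rfl, rfl⟩ : a = 't' ∧ b = 't' := ⟨hab.1.trans hab.2, hab.2⟩
        rw [if_pos (by simp)]
        rw [PySem.List.slice_to s (show (0 : Int) ≤ (n : Int) by omega),
            PySem.List.slice_from s (show (0 : Int) ≤ (n : Int) + 2 by omega)]
        rw [show ((n : Int)).toNat = n by simp, show ((n : Int) + 2).toNat = n + 2 by omega]
        set s' := s.take n ++ 'o' :: s.drop (n + 2) with hs'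
        have htn : (s.take n).length = n := by simp; omega
        have hlen' : s'.length = s.length - 1 := by
          simp [hs', htn]; omega
        -- right-hand side
        rw [hd, pvSpec, if_pos ⟨rfl, rfl⟩, ← hdrop2]
        -- fuel is ample
        obtain ⟨f3, rfl⟩ : ∃ f3, f = f3 + 3 := ⟨f - 3, by omega⟩
        -- step back to i = n - 1: second probed char is 'o', no match
        rw [show ((n : Int) - 2 + 1) = (n : Int) - 1 by omega]
        have hgo : PySem.List.pyGet? s' (n : Int) = some 'o' := by
          rw [show ((n : Int)) = ((s.take n).length : Int) by rw [htn]]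
          exact PySem.List.pyGet?_append_length (s.take n) (s.drop (n + 2)) 'o'
        obtain ⟨z, hz⟩ := pvGet_some s' ((n : Int) - 1) (by omega) (by omega)
        have hguard1 : ((n : Int) - 1) < PySem.List.len s' - 2 := by
          simp only [PySem.List.len_eq, hlen']; omega
        rw [pvALoop_step (f3 + 2) s' ((n : Int) - 1) z 'o' hguard1 hz
              (by rw [show ((n : Int) - 1 + 1) = (n : Int) by omega]; exact hgo)]
        rw [if_neg (by simp), show ((n : Int) - 1 + 1) = (n : Int) by omega]
        -- step at i = n: char is 'o', no match (or the loop stops)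
        by_cases hg2 : n + 3 < s.length
        · have hguard2 : ((n : Int)) < PySem.List.len s' - 2 := by
            simp only [PySem.List.len_eq, hlen']; omega
          obtain ⟨w, hw⟩ := pvGet_some s' ((n : Int) + 1) (by omega) (by omega)
          rw [pvALoop_step (f3 + 1) s' (n : Int) 'o' w hguard2 hgo hw]
          rw [if_neg (by by_cases hwt : w = 't' <;> simp [hwt])]
          rw [show ((n : Int) + 1) = ((n + 1 : Nat) : Int) by omega]
          rw [ih (f3 + 1) (by omega) s' (n + 1) (by omega)]
          have htk : s'.take (n + 1) = s.take n ++ ['o'] := by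
            rw [hs', List.take_append, htn]
            rw [List.take_of_length_le (by omega)]
            simp
          have hdr : s'.drop (n + 1) = s.drop (n + 2) := by
            rw [hs', List.drop_append, htn]
            rw [List.drop_of_length_le (by omega)]
            simp
          rw [htk, hdr]
          simp
        · -- n + 3 = s.length: the loop stops and s' is already the answer
          have hguard2 : ¬ ((n : Int)) < PySem.List.len s' - 2 := by
            simp only [PySem.List.len_eq, hlen']; omega
          rw [pvALoop_stop (f3 + 1) s' (n : Int) hguard2]
          rw [pvSpec_short (s.drop (n + 2)) (by simp; omega)]
      · -- no match: advance i by one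
        have hcond : (a == b && b == 't') = false := by
          rcases Decidable.em (a = b) with h1 | h1
          · rcases Decidable.em (b = 't') with h2 | h2
            · exact absurd ⟨h1, h2⟩ hab
            · simp [h2]
          · simp [h1]
        rw [hcond, if_neg (by simp)]
        rw [show ((n : Int) + 1) = ((n + 1 : Nat) : Int) by omega]
        rw [ih f (by omega) s (n + 1) (by omega)]
        rw [hd, pvSpec, if_neg (fun h => hab ⟨h.1.trans h.2.symm, h.2⟩), hdrop1]
        rw [List.take_add_one, ha]
        simp
    · -- guard false: the loop returns s, and the suffix is too short to change
      have hlen : s.length ≤ n + 2 := by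
        simp only [PySem.List.len_eq] at hg; omega
      rw [pvALoop, if_neg hg]
      rw [pvSpec_short (s.drop n) (by simp; omega)]
      exact (List.take_append_drop n s).symm

theorem aSide (l : List Char) : pvALoop (2 * l.length + 1) l 0 = pvSpec l := by
  have := pvALoop_eq (2 * l.length + 1) l 0 (by omega)
  simpa using this

-- B side: the foldl builds a run-length encoding
def pvGrow : Char × Nat → List Char → List (Char × Nat)
  | (c, k), [] => [(c, k)]
  | (c, k), x :: xs => if x = c then pvGrow (c, k + 1) xs else (c, k) :: pvGrow (x, 1) xs

theorem pvFoldl_addRun (l : List Char) (rs : List (Char × Nat)) (c : Char) (k : Nat) :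
    l.foldl pvAddRun (rs ++ [(c, k)]) = rs ++ pvGrow (c, k) l := by
  induction l generalizing rs c k with
  | nil => simp [pvGrow]
  | cons x xs ih =>
    simp only [List.foldl_cons]
    by_cases hx : c = x
    · subst hx
      simp only [pvAddRun, List.getLast?_concat, List.dropLast_concat, beq_self_eq_true,
        if_true, pvGrow]
      exact ih rs c (k + 1)
    · have : pvAddRun (rs ++ [(c, k)]) x = (rs ++ [(c, k)]) ++ [(x, 1)] := by
        simp [pvAddRun, beq_iff_eq, hx]
      rw [this]
      have := ih (rs ++ [(c, k)]) x 1
      rw [this]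
      simp only [pvGrow]
      rw [if_neg (show ¬ x = c from fun h => hx h.symm)]
      simp

def pvFlat (rs : List (Char × Nat)) : List Char := rs.flatMap (fun p => List.replicate p.2 p.1)

def pvValid : List (Char × Nat) → Prop
  | [] => True
  | (c, k) :: rs => 1 ≤ k ∧ (∀ d k', rs.head? = some (d, k') → d ≠ c) ∧ pvValid rs

theorem pvGrow_flat (l : List Char) (c : Char) (k : Nat) :
    pvFlat (pvGrow (c, k) l) = List.replicate k c ++ l := by
  induction l generalizing c k with
  | nil => simp [pvGrow, pvFlat]
  | cons x xs ih =>
    by_cases hx : x = c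
    · subst hx
      simp only [pvGrow, if_true]
      rw [ih]
      rw [List.replicate_succ', List.append_assoc]
      simp
    · simp only [pvGrow, if_neg hx, pvFlat, List.flatMap_cons]
      have := ih x 1
      simp only [pvFlat] at this
      rw [this]
      simp

theorem pvGrow_head (l : List Char) (c : Char) (k : Nat) :
    ∃ m, (pvGrow (c, k) l).head? = some (c, m) := by
  induction l generalizing k with
  | nil => exact ⟨k, rfl⟩
  | cons x xs ih =>
    by_cases hx : x = c
    · subst hx; simpa [pvGrow] using ih (k + 1)
    · exact ⟨k, by simp [pvGrow, hx]⟩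

theorem pvGrow_valid (l : List Char) (c : Char) (k : Nat) (hk : 1 ≤ k) :
    pvValid (pvGrow (c, k) l) := by
  induction l generalizing c k with
  | nil => exact ⟨hk, by simp, trivial⟩
  | cons x xs ih =>
    by_cases hx : x = c
    · subst hx; simpa [pvGrow] using ih x (k + 1) (by omega)
    · simp only [pvGrow, if_neg hx, pvValid]
      refine ⟨hk, ?_, ih x 1 (by omega)⟩
      intro d k' hd
      obtain ⟨m, hm⟩ := pvGrow_head xs x 1
      rw [hm] at hd
      intro hdc
      apply hx
      cases hd
      exact hdc

theorem pvSpecB_cons_ne (c : Char) (l : List Char) (h : c ≠ 't') :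
    pvSpecB (c :: l) = c :: pvSpecB l := by
  match l with
  | [] => rfl
  | d :: r => simp [pvSpecB, h]

theorem pvSpecB_rep_ne (c : Char) (h : c ≠ 't') (k : Nat) (l : List Char) :
    pvSpecB (List.replicate k c ++ l) = List.replicate k c ++ pvSpecB l := by
  induction k with
  | zero => simp
  | succ m ih => simp [List.replicate_succ, pvSpecB_cons_ne c _ h, ih]

theorem pvSpecB_rep_t (k : Nat) (l : List Char)
    (hl : ∀ x, l.head? = some x → x ≠ 't') :
    pvSpecB (List.replicate k 't' ++ l) =
      List.replicate (k / 2) 'o' ++ List.replicate (k % 2) 't' ++ pvSpecB l := by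
  induction k using Nat.strong_induction_on with
  | _ k ih =>
    match k with
    | 0 => simp
    | 1 =>
      match l, hl with
      | [], _ => simp [pvSpecB]
      | x :: r, hl =>
        have hx : x ≠ 't' := hl x rfl
        have : pvSpecB ('t' :: x :: r) = 't' :: pvSpecB (x :: r) := by
          rw [pvSpecB]; simp [hx]
        simpa [List.replicate_succ] using this
    | (m + 2) =>
      have h1 : List.replicate (m + 2) 't' ++ l =
          't' :: 't' :: (List.replicate m 't' ++ l) := by
        simp [List.replicate_succ]
      have h2 : pvSpecB (List.replicate (m + 2) 't' ++ l) =
          'o' :: pvSpecB (List.replicate m 't' ++ l) := by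
        rw [h1, pvSpecB]; simp
      rw [h2, ih m (by omega)]
      have e1 : (m + 2) / 2 = m / 2 + 1 := by omega
      have e2 : (m + 2) % 2 = m % 2 := by omega
      simp [e1, e2, List.replicate_succ]

theorem pvRender_eq (rs : List (Char × Nat)) (hv : pvValid rs) :
    rs.flatMap pvPiece = pvSpecB (pvFlat rs) := by
  induction rs with
  | nil => rfl
  | cons p rs ih =>
    obtain ⟨c, k⟩ := p
    obtain ⟨hk, hhead, hv'⟩ := hv
    have hfl : pvFlat ((c, k) :: rs) = List.replicate k c ++ pvFlat rs := by
      simp [pvFlat]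
    by_cases hc : c = 't'
    · subst hc
      have hh : ∀ x, (pvFlat rs).head? = some x → x ≠ 't' := by
        intro x hx
        match rs, hv', hhead with
        | [], _, _ => simp [pvFlat] at hx
        | (d, k') :: rs', hv', hhead =>
          have hd : d ≠ 't' := hhead d k' rfl
          have hk' : 1 ≤ k' := hv'.1
          have : pvFlat ((d, k') :: rs') = d :: (List.replicate (k' - 1) d ++ pvFlat rs') := by
            simp only [pvFlat, List.flatMap_cons]
            rw [show List.replicate k' d = d :: List.replicate (k' - 1) d by
              rw [← List.replicate_succ]; congr 1; omega]
            simp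
          rw [this] at hx
          simp at hx
          rw [← hx]; exact hd
      rw [hfl, pvSpecB_rep_t k _ hh, List.flatMap_cons, ih hv']
      simp [pvPiece]
    · rw [hfl, pvSpecB_rep_ne c hc, List.flatMap_cons, ih hv']
      simp [pvPiece, hc]

theorem bSide (l : List Char) : (l.foldl pvAddRun []).flatMap pvPiece = pvSpecB l := by
  match l with
  | [] => rfl
  | c :: tl =>
    have h0 : (c :: tl).foldl pvAddRun [] = pvGrow (c, 1) tl := by
      have := pvFoldl_addRun tl [] c 1
      simpa [pvAddRun] using this
    rw [h0, pvRender_eq _ (pvGrow_valid tl c 1 (by omega)), pvGrow_flat]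
    simp

-- trailing-run bookkeeping for D_
theorem pvTrailT_le (l : List Char) : pvTrailT l ≤ l.length := by
  induction l with
  | nil => simp [pvTrailT]
  | cons c l ih =>
    rw [pvTrailT]
    split_ifs <;> simp; omega

-- the condition D transfers along the 'tt' recursion step of the specs
theorem pvD_step_tt (l : List Char)
    (h : ¬ (2 ≤ pvTrailT ('t' :: 't' :: l) ∧ pvTrailT ('t' :: 't' :: l) % 2 = 0)) :
    ¬ (2 ≤ pvTrailT l ∧ pvTrailT l % 2 = 0) := by
  have hle := pvTrailT_le l
  by_cases hall : pvTrailT l = l.length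
  · have h1 : pvTrailT ('t' :: l) = l.length + 1 := by
      rw [pvTrailT, if_pos ⟨rfl, hall⟩]
    have h2 : pvTrailT ('t' :: 't' :: l) = l.length + 2 := by
      rw [pvTrailT, if_pos ⟨rfl, by simpa using h1⟩]; simp
    rw [h2] at h
    omega
  · have h1 : pvTrailT ('t' :: l) = pvTrailT l := by
      rw [pvTrailT, if_neg (by intro hh; exact hall hh.2)]
    have h2 : pvTrailT ('t' :: 't' :: l) = pvTrailT l := by
      rw [pvTrailT]
      rw [if_neg (by intro hh; rw [h1] at hh; simp at hh; omega)]
      exact h1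
    rw [h2] at h
    exact h

-- D holds on the tail after the 'tt' step
theorem pvD_step_tt_pos (l : List Char) (hne : l ≠ [])
    (h : 2 ≤ pvTrailT ('t' :: 't' :: l) ∧ pvTrailT ('t' :: 't' :: l) % 2 = 0) :
    2 ≤ pvTrailT l ∧ pvTrailT l % 2 = 0 := by
  have hle := pvTrailT_le l
  have hlen : 1 ≤ l.length := by cases l with | nil => exact absurd rfl hne | cons x xs => simp
  by_cases hall : pvTrailT l = l.length
  · have h1 : pvTrailT ('t' :: l) = l.length + 1 := by
      rw [pvTrailT, if_pos ⟨rfl, hall⟩]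
    have h2 : pvTrailT ('t' :: 't' :: l) = l.length + 2 := by
      rw [pvTrailT, if_pos ⟨rfl, by simpa using h1⟩]; simp
    rw [h2] at h
    omega
  · have h1 : pvTrailT ('t' :: l) = pvTrailT l := by
      rw [pvTrailT, if_neg (by intro hh; exact hall hh.2)]
    have h2 : pvTrailT ('t' :: 't' :: l) = pvTrailT l := by
      rw [pvTrailT]
      rw [if_neg (by intro hh; rw [h1] at hh; simp at hh; omega)]
      exact h1
    rw [h2] at h
    exact h

-- if the trailing run fills c :: l entirely, its head is 't'
theorem pvTrailT_head_t (c : Char) (l : List Char)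
    (h : pvTrailT (c :: l) = l.length + 1) : c = 't' := by
  by_contra hc
  rw [pvTrailT, if_neg (by rintro ⟨rfl, _⟩; exact hc rfl)] at h
  have := pvTrailT_le l
  omega

-- the 'no match' step leaves pvTrailT unchanged (a, b not both 't', b heads the tail)
theorem pvD_step_cons (a b : Char) (l : List Char) (hab : ¬ (a = 't' ∧ b = 't')) :
    pvTrailT (a :: b :: l) = pvTrailT (b :: l) := by
  rw [pvTrailT]
  rw [if_neg ?_]
  rintro ⟨rfl, hh⟩
  have hb : b = 't' := pvTrailT_head_t b l (by simpa using hh)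
  exact hab ⟨rfl, hb⟩

-- outside D_, the two greedy specs coincide
theorem pvSpec_eq_pvSpecB (n : Nat) : ∀ l : List Char, l.length ≤ n →
    ¬ (2 ≤ pvTrailT l ∧ pvTrailT l % 2 = 0) → pvSpec l = pvSpecB l := by
  induction n with
  | zero =>
    intro l hl _
    match l, hl with
    | [], _ => rfl
  | succ n ih =>
    intro l hl h
    match l with
    | [] => rfl
    | [c] => rfl
    | [c, d] =>
      by_cases hcd : c = 't' ∧ d = 't'
      · obtain ⟨rfl, rfl⟩ := hcd
        exact absurd (by decide) h
      · show pvSpec [c, d] = pvSpecB [c, d]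
        rw [pvSpec, pvSpecB, if_neg hcd, pvSpecB]
    | a :: b :: c :: r =>
      by_cases hab : a = 't' ∧ b = 't'
      · obtain ⟨rfl, rfl⟩ := hab
        rw [pvSpec, pvSpecB, if_pos ⟨rfl, rfl⟩, if_pos ⟨rfl, rfl⟩]
        have := pvD_step_tt (c :: r) h
        rw [ih (c :: r) (by simp at hl ⊢; omega) this]
      · rw [pvSpec, pvSpecB, if_neg hab, if_neg hab]
        have hT := pvD_step_cons a b (c :: r) hab
        rw [ih (b :: c :: r) (by simp at hl ⊢; omega) (by rw [← hT]; exact h)]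

-- inside D_, B's result is strictly shorter than A's
theorem pvSpecB_len_lt (n : Nat) : ∀ l : List Char, l.length ≤ n →
    (2 ≤ pvTrailT l ∧ pvTrailT l % 2 = 0) → (pvSpecB l).length < (pvSpec l).length := by
  induction n with
  | zero =>
    intro l hl hD
    match l, hl with
    | [], _ => exact absurd hD (by decide)
  | succ n ih =>
    intro l hl hD
    match l with
    | [] => exact absurd hD (by decide)
    | [c] =>
      have h1 : pvTrailT [c] ≤ 1 := by simpa using pvTrailT_le [c]
      exact absurd hD.1 (by omega)
    | [c, d] =>
      have h2 : pvTrailT [c, d] = 2 := by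
        have := pvTrailT_le [c, d]
        simp at this
        omega
      have hc : c = 't' := pvTrailT_head_t c [d] (by simpa using h2)
      subst hc
      have hd : d = 't' := by
        rw [pvTrailT] at h2
        by_cases hh : pvTrailT [d] = 1
        · exact pvTrailT_head_t d [] (by simpa using hh)
        · rw [if_neg (by rintro ⟨_, h⟩; simp at h; exact hh h)] at h2
          have := pvTrailT_le [d]
          simp at this
          omega
      subst hd
      decide
    | a :: b :: c :: r =>
      by_cases hab : a = 't' ∧ b = 't'
      · obtain ⟨rfl, rfl⟩ := hab
        rw [pvSpec, pvSpecB, if_pos ⟨rfl, rfl⟩, if_pos ⟨rfl, rfl⟩]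
        have hD' := pvD_step_tt_pos (c :: r) (by simp) hD
        have := ih (c :: r) (by simp at hl ⊢; omega) hD'
        simpa using this
      · rw [pvSpec, pvSpecB, if_neg hab, if_neg hab]
        have hT := pvD_step_cons a b (c :: r) hab
        rw [hT] at hD
        have := ih (b :: c :: r) (by simp at hl ⊢; omega) hD
        simpa using this

-- ===== VERDICT (by name: the statement is the Claim_ definition above) =====
theorem replace_twin_spec : Claim_unchanged_replace_twin := by
  intro dna _
  unfold Spec_replace_twin
  intro hnd
  unfold replace_twin replace_twin_alt
  rw [aSide, bSide, pvSpec_eq_pvSpecB dna.toList.length dna.toList le_rfl hnd]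

theorem replace_twin_changed : Claim_changed_replace_twin := by
  unfold Claim_changed_replace_twin; decide

theorem replace_twin_tight : Claim_exact_replace_twin := by
  intro dna _ hD heq
  have h1 : pvSpec dna.toList = pvSpecB dna.toList := by
    have := congrArg String.toList heq
    unfold replace_twin replace_twin_alt at this
    rw [aSide, bSide] at this
    simpa using this
  have h2 := pvSpecB_len_lt dna.toList.length dna.toList le_rfl hD
  rw [h1] at h2
  omega
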